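-- pv_equiv track=rewrite | github.com/CColike/Soochow-University-CS | python/2027405033-exp-8.py | jie
-- ===== SOURCE A (Python) =====
-- def jie(s,n=5):#解密
--     s = s + ' '
--     ss = ''
--     j = 0
--     for i in s:
--         o = ord(i)
--         if o in range(48, 58):#判断并联系连在一起的整数
--             j = j * 10 + o - 48
--         elif j != 0:
--             ss = ss + str(j // 5)
--             j = 0
--         if o in range(97, 123):
--             ss = ss + chr((o-96+26-n) % 26+96)
--         if o in range(65, 91):
--             ss = ss + chr((o-64+26-n) % 26+64)
--     return ss
-- ===== SOURCE B (Python) =====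
-- def jie(s, n=5):  # decrypt: shift letters back by n, divide each nonzero digit run by 5
--     pieces = []
--     i = 0
--     L = len(s)
--     while i < L:
--         c = s[i]
--         if '0' <= c <= '9':
--             num = 0
--             while i < L and '0' <= s[i] <= '9':
--                 num = num * 10 + (ord(s[i]) - 48)
--                 i += 1
--             if num != 0:
--                 pieces.append(str(num // 5))
--         else:
--             o = ord(c)
--             if 97 <= o <= 122:
--                 pieces.append(chr((o - 96 + 26 - n) % 26 + 96))
--             elif 65 <= o <= 90:
--                 pieces.append(chr((o - 64 + 26 - n) % 26 + 64))
--             i += 1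
--     return ''.join(pieces)
-- ===== Notes on version B (the rewrite author's own statement) =====
-- stated objective: alternative
-- what changed: B scans the string token-wise (an inner loop consumes each maximal digit run at once, converts it with int and emits its piece), collecting output pieces in a list joined at the end, instead of A's single character loop threading an accumulator j, flush-on-non-digit logic and an appended sentinel space.
import Mathlib
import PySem

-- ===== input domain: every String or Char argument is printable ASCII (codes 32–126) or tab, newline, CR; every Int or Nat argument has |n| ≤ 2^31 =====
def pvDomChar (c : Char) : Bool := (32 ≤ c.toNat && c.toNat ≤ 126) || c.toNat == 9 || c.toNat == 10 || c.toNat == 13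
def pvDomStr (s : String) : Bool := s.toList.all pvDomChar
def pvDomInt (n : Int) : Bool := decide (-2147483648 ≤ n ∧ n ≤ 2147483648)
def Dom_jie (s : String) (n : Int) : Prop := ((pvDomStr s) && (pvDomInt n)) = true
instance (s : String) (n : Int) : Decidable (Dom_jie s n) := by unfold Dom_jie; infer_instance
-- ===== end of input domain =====

-- B restructures A's single character loop (accumulator j, flush-on-non-digit, appended sentinel
-- space) into a token-wise scan: an inner loop consumes each maximal digit run at once and output
-- pieces are collected in a list joined at the end; objective: alternative decomposition, same cost.

-- ===== PORT A =====
-- one step of A's `for i in s:` loop; state = (ss as chars, j)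
def jieStepA (n : Int) (st : List Char × Int) (i : Char) : List Char × Int :=
  let o : Int := (i.toNat : Int)
  let st1 : List Char × Int :=
    if 48 ≤ o ∧ o < 58 then (st.1, st.2 * 10 + o - 48)
    else if st.2 ≠ 0 then (st.1 ++ PySem.Int.toChars (PySem.Int.floordiv st.2 5), 0)
    else st
  let ss2 := if 97 ≤ o ∧ o < 123 then st1.1 ++ [Char.ofNat (PySem.Int.mod (o - 96 + 26 - n) 26 + 96).toNat] else st1.1
  let ss3 := if 65 ≤ o ∧ o < 91 then ss2 ++ [Char.ofNat (PySem.Int.mod (o - 64 + 26 - n) 26 + 64).toNat] else ss2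
  (ss3, st1.2)

def jie (s : String) (n : Int) : String :=
  String.mk ((s.toList ++ [' ']).foldl (jieStepA n) ([], 0)).1

-- ===== PORT B =====
def isDigB (c : Char) : Bool := decide ('0' ≤ c ∧ c ≤ '9')

-- the outer while loop of Source B over the remaining characters; each piece is a List Char
def jieGoB (n : Int) : List Char → List (List Char)
  | [] => []
  | c :: cs =>
    if isDigB c then
      -- inner while loop: consume the maximal digit run, accumulating num
      let num := (c :: cs.takeWhile isDigB).foldl (fun a d => a * 10 + ((d.toNat : Int) - 48)) 0
      (if num ≠ 0 then [PySem.Int.toChars (PySem.Int.floordiv num 5)] else [])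
        ++ jieGoB n (cs.dropWhile isDigB)
    else
      (if 97 ≤ (c.toNat : Int) ∧ (c.toNat : Int) ≤ 122 then
         [[Char.ofNat (PySem.Int.mod ((c.toNat : Int) - 96 + 26 - n) 26 + 96).toNat]]
       else if 65 ≤ (c.toNat : Int) ∧ (c.toNat : Int) ≤ 90 then
         [[Char.ofNat (PySem.Int.mod ((c.toNat : Int) - 64 + 26 - n) 26 + 64).toNat]]
       else []) ++ jieGoB n cs
termination_by cs => cs.length
decreasing_by
· exact Nat.lt_succ_of_le (List.length_dropWhile_le _ _)
· exact Nat.lt_succ_self _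

def jie_alt (s : String) (n : Int) : String :=
  String.mk (jieGoB n s.toList).flatten

-- ===== PRECONDITION & SPEC =====
def Spec_jie (s : String) (n : Int) (out : String) : Prop := out = jie_alt s n
instance (s : String) (n : Int) (out : String) : Decidable (Spec_jie s n out) := by unfold Spec_jie; infer_instance

-- ===== CLAIM (what is proved, stated in full; the proofs are below) =====
def Claim_equal_jie : Prop := ∀ (s : String) (n : Int), Dom_jie s n → Spec_jie s n (jie s n)

-- ===== LEMMAS AND PROOFS =====

-- A's loop, written as recursion on the character list (state j; ss factored out)
def emitA (n : Int) (j : Int) : List Char → List Char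
  | [] => if j ≠ 0 then PySem.Int.toChars (PySem.Int.floordiv j 5) else []
  | c :: cs =>
    let o : Int := (c.toNat : Int)
    if 48 ≤ o ∧ o < 58 then emitA n (j * 10 + o - 48) cs
    else
      (if j ≠ 0 then PySem.Int.toChars (PySem.Int.floordiv j 5) else [])
        ++ (if 97 ≤ o ∧ o < 123 then [Char.ofNat (PySem.Int.mod (o - 96 + 26 - n) 26 + 96).toNat] else [])
        ++ (if 65 ≤ o ∧ o < 91 then [Char.ofNat (PySem.Int.mod (o - 64 + 26 - n) 26 + 64).toNat] else [])
        ++ emitA n 0 cs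

theorem isDigB_iff (c : Char) : isDigB c = true ↔ (48 ≤ (c.toNat : Int) ∧ (c.toNat : Int) < 58) := by
  have h0 : ('0' ≤ c ↔ 48 ≤ c.toNat) := by
    rw [Char.le_def, UInt32.le_iff_toNat_le]; rfl
  have h9 : (c ≤ '9' ↔ c.toNat ≤ 57) := by
    rw [Char.le_def, UInt32.le_iff_toNat_le]; rfl
  simp [isDigB, h0, h9]
  omega

theorem stepA_nondigit (n : Int) (ss : List Char) (j : Int) (c : Char)
    (hd : ¬(48 ≤ (c.toNat : Int) ∧ (c.toNat : Int) < 58)) :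
    jieStepA n (ss, j) c =
      (ss ++ (if j ≠ 0 then PySem.Int.toChars (PySem.Int.floordiv j 5) else [])
          ++ (if 97 ≤ (c.toNat : Int) ∧ (c.toNat : Int) < 123 then [Char.ofNat (PySem.Int.mod ((c.toNat : Int) - 96 + 26 - n) 26 + 96).toNat] else [])
          ++ (if 65 ≤ (c.toNat : Int) ∧ (c.toNat : Int) < 91 then [Char.ofNat (PySem.Int.mod ((c.toNat : Int) - 64 + 26 - n) 26 + 64).toNat] else []), 0) := by
  simp only [jieStepA, if_neg hd]
  split_ifs <;> simp <;> omega

theorem foldA_eq_emitA (n : Int) (cs : List Char) :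
    ∀ (ss : List Char) (j : Int),
      ((cs ++ [' ']).foldl (jieStepA n) (ss, j)).1 = ss ++ emitA n j cs := by
  induction cs with
  | nil =>
    intro ss j
    have h32 : ¬(48 ≤ ((' '.toNat : Int)) ∧ ((' '.toNat : Int)) < 58) := by decide
    have hl : ¬(97 ≤ ((' '.toNat : Int)) ∧ ((' '.toNat : Int)) < 123) := by decide
    have hu : ¬(65 ≤ ((' '.toNat : Int)) ∧ ((' '.toNat : Int)) < 91) := by decide
    rw [List.nil_append, List.foldl_cons, List.foldl_nil, stepA_nondigit n ss j ' ' h32]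
    simp only [emitA, if_neg hl, if_neg hu, List.append_nil]
  | cons c cs ih =>
    intro ss j
    rw [List.cons_append, List.foldl_cons]
    by_cases hd : 48 ≤ (c.toNat : Int) ∧ (c.toNat : Int) < 58
    · have h1 : ¬(97 ≤ (c.toNat : Int) ∧ (c.toNat : Int) < 123) := by omega
      have h2 : ¬(65 ≤ (c.toNat : Int) ∧ (c.toNat : Int) < 91) := by omega
      simp only [jieStepA, if_pos hd, if_neg h1, if_neg h2]
      rw [ih]
      simp only [emitA, if_pos hd]
    · rw [stepA_nondigit n ss j c hd, ih]
      conv_rhs => rw [emitA]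
      simp only [if_neg hd, List.append_assoc]

-- pulling one flushed digit run back into jieGoB's token scan
theorem goB_absorb_run (n : Int) (cs : List Char) :
    (if (cs.takeWhile isDigB).foldl (fun a d => a * 10 + ((d.toNat : Int) - 48)) 0 ≠ 0 then
       PySem.Int.toChars (PySem.Int.floordiv ((cs.takeWhile isDigB).foldl (fun a d => a * 10 + ((d.toNat : Int) - 48)) 0) 5)
     else []) ++ (jieGoB n (cs.dropWhile isDigB)).flatten = (jieGoB n cs).flatten := by
  cases cs with
  | nil => simp
  | cons c cs =>
    by_cases hc : isDigB c
    · conv_rhs => rw [jieGoB]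
      rw [if_pos hc, List.takeWhile_cons_of_pos hc, List.dropWhile_cons_of_pos hc]
      simp only [List.foldl_cons, zero_mul, zero_add]
      split_ifs <;> simp_all
    · rw [List.takeWhile_cons_of_neg hc, List.dropWhile_cons_of_neg hc]
      simp

theorem emitA_eq_goB (n : Int) (cs : List Char) :
    ∀ (j : Int),
      emitA n j cs =
        (if (cs.takeWhile isDigB).foldl (fun a d => a * 10 + ((d.toNat : Int) - 48)) j ≠ 0 then
           PySem.Int.toChars (PySem.Int.floordiv ((cs.takeWhile isDigB).foldl (fun a d => a * 10 + ((d.toNat : Int) - 48)) j) 5)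
         else []) ++ (jieGoB n (cs.dropWhile isDigB)).flatten := by
  induction cs with
  | nil => intro j; simp [emitA, jieGoB]
  | cons c cs ih =>
    intro j
    by_cases hd : 48 ≤ (c.toNat : Int) ∧ (c.toNat : Int) < 58
    · have hc : isDigB c = true := (isDigB_iff c).mpr hd
      rw [List.takeWhile_cons_of_pos hc, List.dropWhile_cons_of_pos hc, List.foldl_cons]
      have harith : j * 10 + (c.toNat : Int) - 48 = j * 10 + ((c.toNat : Int) - 48) := by ring
      conv_lhs => rw [emitA]
      rw [if_pos hd, harith, ih]
    · have hc : ¬ isDigB c = true := fun h => hd ((isDigB_iff c).mp h)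
      rw [List.takeWhile_cons_of_neg hc, List.dropWhile_cons_of_neg hc, List.foldl_nil]
      conv_lhs => rw [emitA]
      rw [if_neg hd, ih 0, goB_absorb_run]
      conv_rhs => rw [jieGoB]
      rw [if_neg hc]
      have hl : (97 ≤ (c.toNat : Int) ∧ (c.toNat : Int) < 123) ↔ (97 ≤ (c.toNat : Int) ∧ (c.toNat : Int) ≤ 122) := by omega
      have hu : (65 ≤ (c.toNat : Int) ∧ (c.toNat : Int) < 91) ↔ (65 ≤ (c.toNat : Int) ∧ (c.toNat : Int) ≤ 90) := by omega
      by_cases h1 : 97 ≤ (c.toNat : Int) ∧ (c.toNat : Int) < 123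
      · have h2 : ¬(65 ≤ (c.toNat : Int) ∧ (c.toNat : Int) < 91) := by omega
        rw [if_pos h1, if_neg h2, if_pos (hl.mp h1)]
        simp
      · rw [if_neg h1, if_neg (fun h => h1 (hl.mpr h))]
        by_cases h2 : 65 ≤ (c.toNat : Int) ∧ (c.toNat : Int) < 91
        · rw [if_pos h2, if_pos (hu.mp h2)]
          simp
        · rw [if_neg h2, if_neg (fun h => h2 (hu.mpr h))]
          simp

-- ===== VERDICT (by name: the statement is the Claim_ definition above) =====
theorem jie_spec : Claim_equal_jie := by
  intro s n _
  show jie s n = jie_alt s n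
  rw [jie, jie_alt, foldA_eq_emitA, List.nil_append, emitA_eq_goB, goB_absorb_run]
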